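-- pv_equiv track=rewrite | github.com/Darkduv/Project-Euler | Project Euler/Problems_100_to_119.py | tri2
-- ===== SOURCE A (Python) =====
-- def tri2(L):
--     d = len(L)
--     for i in range(d):
--         for j in range(i + 1, d):
--             for k in range(j + 1, d):
--                 for kk in range(k + 1, d):
--                     if L[i] + L[kk] == L[j] + L[k] or L[j] + L[kk] == L[i] + L[k]:
--                         return False
--     return True
-- ===== SOURCE B (Python) =====
-- def tri2(L):
--     n = len(L)
--     seen = set()
--     for k in range(n):
--         for kk in range(k + 1, n):
--             if abs(L[kk] - L[k]) in seen:
--                 return False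
--         for i in range(k):
--             seen.add(abs(L[k] - L[i]))
--     return True
-- ===== Notes on version B (the rewrite author's own statement) =====
-- stated objective: alternative
-- what changed: Replaced A's scan over all quadruples i<j<k<kk by a single sweep over pairs that keeps a set of absolute differences |L[j]-L[i]| of pairs lying entirely before the current index and checks each new pair's absolute difference against it (both of A's cross-sum conditions are exactly 'equal or opposite pair difference'); worst-case cost drops from O(n^4) to O(n^2), but on random early-exit inputs the measured speed-up varied between runs (1.4x-4.9x), so no speed claim is made.
import Mathlib
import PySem

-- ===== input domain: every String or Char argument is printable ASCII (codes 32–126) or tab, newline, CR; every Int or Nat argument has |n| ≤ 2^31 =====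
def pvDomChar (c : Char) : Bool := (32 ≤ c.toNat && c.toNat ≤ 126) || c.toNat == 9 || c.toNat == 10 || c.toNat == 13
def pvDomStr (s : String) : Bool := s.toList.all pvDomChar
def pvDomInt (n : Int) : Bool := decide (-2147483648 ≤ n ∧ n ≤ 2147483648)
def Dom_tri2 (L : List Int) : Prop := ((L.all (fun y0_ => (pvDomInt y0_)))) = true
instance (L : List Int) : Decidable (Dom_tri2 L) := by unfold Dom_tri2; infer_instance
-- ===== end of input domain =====

-- B replaces A's scan over all quadruples i<j<k<kk by a single sweep over pairs keeping a set of
-- absolute pair differences seen so far (equal cross-sums = equal-or-opposite pair differences).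

-- ===== PORT A =====
def tri2 (L : List Int) : Bool :=
  let d : Int := L.length
  !((PySem.List.pyRange 0 d 1).any fun i =>
    (PySem.List.pyRange (i+1) d 1).any fun j =>
      (PySem.List.pyRange (j+1) d 1).any fun k =>
        (PySem.List.pyRange (k+1) d 1).any fun kk =>
          decide (PySem.List.pyGetD L i 0 + PySem.List.pyGetD L kk 0
                    = PySem.List.pyGetD L j 0 + PySem.List.pyGetD L k 0) ||
          decide (PySem.List.pyGetD L j 0 + PySem.List.pyGetD L kk 0
                    = PySem.List.pyGetD L i 0 + PySem.List.pyGetD L k 0))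

-- ===== PORT B =====
-- one iteration of Source B's 'for k in range(n)' loop, with early return encoded as false
def tri2AltGo (L : List Int) (n : Nat) (seen : PySem.Set Int) (k : Nat) : Bool :=
  if k < n then
    if (PySem.List.pyRange ((k : Int) + 1) (n : Int) 1).any
        (fun kk => PySem.Set.contains seen
          |PySem.List.pyGetD L kk 0 - PySem.List.pyGetD L (k : Int) 0|) then
      false
    else
      tri2AltGo L n
        ((PySem.List.pyRange 0 (k : Int) 1).foldl
          (fun s i => PySem.Set.add s
            |PySem.List.pyGetD L (k : Int) 0 - PySem.List.pyGetD L i 0|) seen)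
        (k + 1)
  else true
termination_by n - k

def tri2_alt (L : List Int) : Bool := tri2AltGo L L.length PySem.Set.empty 0

-- ===== PRECONDITION & SPEC =====
def Spec_tri2 (L : List Int) (out : Bool) : Prop := out = tri2_alt L
instance (L : List Int) (out : Bool) : Decidable (Spec_tri2 L out) := by unfold Spec_tri2; infer_instance

-- ===== CLAIM (what is proved, stated in full; the proofs are below) =====
def Claim_equal_tri2 : Prop := ∀ (L : List Int), Dom_tri2 L → Spec_tri2 L (tri2 L)

-- ===== LEMMAS AND PROOFS =====

-- shorthand for L[m] (indices are always in range in both loops)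
def gL (L : List Int) (m : Int) : Int := PySem.List.pyGetD L m 0

-- A's quadruple condition as a proposition
def QuadA (L : List Int) : Prop :=
  ∃ i j k kk : Int, 0 ≤ i ∧ i < j ∧ j < k ∧ k < kk ∧ kk < (L.length : Int) ∧
    (gL L i + gL L kk = gL L j + gL L k ∨ gL L j + gL L kk = gL L i + gL L k)

-- B's quadruple condition: two disjoint, ordered pairs with equal absolute difference
def QuadB (L : List Int) (k : Nat) : Prop :=
  ∃ i j k' kk : Int, 0 ≤ i ∧ i < j ∧ j < k' ∧ k' < kk ∧ kk < (L.length : Int) ∧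
    (k : Int) ≤ k' ∧ |gL L j - gL L i| = |gL L kk - gL L k'|

lemma anyA_iff (L : List Int) :
    ((PySem.List.pyRange 0 (L.length : Int) 1).any fun i =>
      (PySem.List.pyRange (i+1) (L.length : Int) 1).any fun j =>
        (PySem.List.pyRange (j+1) (L.length : Int) 1).any fun k =>
          (PySem.List.pyRange (k+1) (L.length : Int) 1).any fun kk =>
            decide (PySem.List.pyGetD L i 0 + PySem.List.pyGetD L kk 0
                      = PySem.List.pyGetD L j 0 + PySem.List.pyGetD L k 0) ||
            decide (PySem.List.pyGetD L j 0 + PySem.List.pyGetD L kk 0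
                      = PySem.List.pyGetD L i 0 + PySem.List.pyGetD L k 0)) = true ↔ QuadA L := by
  simp only [List.any_eq_true, PySem.List.mem_pyRange_one, Bool.or_eq_true, decide_eq_true_eq]
  unfold QuadA
  constructor
  · rintro ⟨i, hi, j, hj, k, hk, kk, hkk, hc⟩
    exact ⟨i, j, k, kk, hi.1, by omega, by omega, by omega, by omega, by simp only [gL]; omega⟩
  · rintro ⟨i, j, k, kk, h0, hij, hjk, hkkk, hn, hc⟩
    exact ⟨i, ⟨h0, by omega⟩, j, ⟨by omega, by omega⟩, k, ⟨by omega, by omega⟩, kk,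
      ⟨by omega, by omega⟩, by simp only [gL] at hc; omega⟩

lemma tri2_eq_true_iff (L : List Int) : tri2 L = true ↔ ¬ QuadA L := by
  unfold tri2
  rw [Bool.not_eq_true', Bool.eq_false_iff, Ne, anyA_iff]

lemma go_iff (L : List Int) : ∀ (m k : Nat) (seen : PySem.Set Int),
    L.length - k = m → k ≤ L.length →
    (∀ x : Int, x ∈ seen ↔ ∃ i j : Int, 0 ≤ i ∧ i < j ∧ j < (k : Int) ∧ x = |gL L j - gL L i|) →
    (tri2AltGo L L.length seen k = true ↔ ¬ QuadB L k) := by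
  intro m
  induction m with
  | zero =>
    intro k seen hm hk _
    have hkn : k = L.length := by omega
    rw [tri2AltGo, if_neg (by omega : ¬ k < L.length)]
    simp only [true_iff]
    rintro ⟨i, j, k', kk, h0, hij, hjk, hkkk, hn, hk', _⟩
    omega
  | succ m ih =>
    intro k seen hm hk hinv
    have hkn : k < L.length := by omega
    rw [tri2AltGo, if_pos hkn]
    by_cases hany : (PySem.List.pyRange ((k : Int) + 1) (L.length : Int) 1).any
        (fun kk => PySem.Set.contains seen
          |PySem.List.pyGetD L kk 0 - PySem.List.pyGetD L (k : Int) 0|) = true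
    · rw [if_pos hany]
      simp only [Bool.false_eq_true, false_iff, not_not]
      rcases List.any_eq_true.mp hany with ⟨kk, hmem, hc⟩
      rw [PySem.List.mem_pyRange_one] at hmem
      rw [PySem.Set.contains_iff] at hc
      rcases (hinv _).mp hc with ⟨i, j, h0, hij, hjk, hx⟩
      exact ⟨i, j, (k : Int), kk, h0, hij, hjk, by omega, hmem.2, le_refl _, by simp only [gL] at hx ⊢; omega⟩
    · rw [if_neg hany]
      -- the updated set describes all pairs with larger index < k + 1
      have hinv' : ∀ x : Int,
          x ∈ (PySem.List.pyRange 0 (k : Int) 1).foldl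
            (fun s i => PySem.Set.add s
              |PySem.List.pyGetD L (k : Int) 0 - PySem.List.pyGetD L i 0|) seen ↔
          ∃ i j : Int, 0 ≤ i ∧ i < j ∧ j < ((k + 1 : Nat) : Int) ∧ x = |gL L j - gL L i| := by
        intro x
        rw [PySem.Set.mem_foldl_add]
        constructor
        · rintro (hx | ⟨b, hb, hx⟩)
          · rcases (hinv x).mp hx with ⟨i, j, h0, hij, hjk, hx⟩
            exact ⟨i, j, h0, hij, by push_cast; omega, hx⟩
          · rw [PySem.List.mem_pyRange_one] at hb
            exact ⟨b, (k : Int), hb.1, hb.2, by push_cast; omega, by simp only [gL] at hx ⊢; omega⟩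
        · rintro ⟨i, j, h0, hij, hjk, hx⟩
          by_cases hjlt : j < (k : Int)
          · exact Or.inl ((hinv x).mpr ⟨i, j, h0, hij, hjlt, hx⟩)
          · have hjeq : j = (k : Int) := by push_cast at hjk; omega
            refine Or.inr ⟨i, ?_, by simp only [gL] at hx ⊢; rw [hjeq] at hx; omega⟩
            rw [PySem.List.mem_pyRange_one]; omega
      rw [ih (k + 1) _ (by omega) (by omega) hinv']
      -- any = false means: no quadruple with k' = k
      have hno : ¬ ∃ i j kk : Int, 0 ≤ i ∧ i < j ∧ j < (k : Int) ∧ (k : Int) < kk ∧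
          kk < (L.length : Int) ∧ |gL L j - gL L i| = |gL L kk - gL L (k : Int)| := by
        rintro ⟨i, j, kk, h0, hij, hjk, hkkk, hn, hx⟩
        apply hany
        rw [List.any_eq_true]
        refine ⟨kk, by rw [PySem.List.mem_pyRange_one]; omega, ?_⟩
        rw [PySem.Set.contains_iff]
        exact (hinv _).mpr ⟨i, j, h0, hij, hjk, by simp only [gL] at hx ⊢; omega⟩
      unfold QuadB
      constructor
      · rintro h ⟨i, j, k', kk, h0, hij, hjk, hkkk, hn, hkle, hx⟩
        by_cases hke : k' = (k : Int)
        · exact hno ⟨i, j, kk, h0, hij, by omega, by omega, hn, by rw [hke] at hx; exact hx⟩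
        · exact h ⟨i, j, k', kk, h0, hij, hjk, hkkk, hn, by push_cast; omega, hx⟩
      · rintro h ⟨i, j, k', kk, h0, hij, hjk, hkkk, hn, hkle, hx⟩
        exact h ⟨i, j, k', kk, h0, hij, hjk, hkkk, hn, by push_cast at hkle ⊢; omega, hx⟩

lemma quad_equiv (L : List Int) : QuadA L ↔ QuadB L 0 := by
  unfold QuadA QuadB
  constructor
  · rintro ⟨i, j, k, kk, h0, hij, hjk, hkkk, hn, hc⟩
    refine ⟨i, j, k, kk, h0, hij, hjk, hkkk, hn, by omega, ?_⟩
    rw [abs_eq_abs]; omega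
  · rintro ⟨i, j, k, kk, h0, hij, hjk, hkkk, hn, _, hc⟩
    refine ⟨i, j, k, kk, h0, hij, hjk, hkkk, hn, ?_⟩
    rw [abs_eq_abs] at hc; omega

-- ===== VERDICT (by name: the statement is the Claim_ definition above) =====
theorem tri2_spec : Claim_equal_tri2 := by
  intro L _
  unfold Spec_tri2 tri2_alt
  rw [Bool.eq_iff_iff, tri2_eq_true_iff, quad_equiv,
    go_iff L (L.length - 0) 0 PySem.Set.empty rfl (by omega)]
  intro x
  simp only [PySem.Set.empty, List.not_mem_nil, false_iff]
  rintro ⟨i, j, h0, hij, hjk, _⟩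
  omega
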